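-- pv_equiv track=rewrite | github.com/rakeshsofteng/DjangoRepo | DjangoEditor/videotool/editor/ffmpeg_utils.py | invert_deletes
-- ===== SOURCE A (Python) =====
-- from typing import List, Tuple
--
-- def _merge_ranges(ranges: List[Tuple[int,int]]):
--     ranges = sorted((s,e) for s,e in ranges if e > s)
--     if not ranges: return []
--     merged = [list(ranges[0])]
--     for s,e in ranges[1:]:
--         if s <= merged[-1][1]:
--             merged[-1][1] = max(merged[-1][1], e)
--         else:
--             merged.append([s,e])
--     return [(s,e) for s,e in merged]
--
-- def invert_deletes(total_frames: int, deletes: List[Tuple[int,int]]):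
--     dels = _merge_ranges(deletes)
--     keeps = []
--     prev = 0
--     for s,e in dels:
--         if prev < s:
--             keeps.append((prev, s))
--         prev = e
--     if prev < total_frames:
--         keeps.append((prev, total_frames))
--     return keeps
-- ===== SOURCE B (Python) =====
-- def invert_deletes(total_frames, deletes):
--     events = []
--     for s, e in deletes:
--         if e > s:
--             events.append((s, 0))
--             events.append((e, 1))
--     events.sort()
--     count = 0
--     prev = 0
--     keeps = []
--     for c, t in events:
--         if t == 0:
--             if count == 0 and prev < c:
--                 keeps.append((prev, c))
--             count += 1
--         else:
--             count -= 1
--             if count == 0: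
--                 prev = c
--     if prev < total_frames:
--         keeps.append((prev, total_frames))
--     return keeps
-- ===== Notes on version B (the rewrite author's own statement) =====
-- stated objective: alternative
-- what changed: Replaces merge-ranges-then-invert (build a merged interval list, then a second inversion pass) with a single sweep-line over sorted start/end events that maintains a coverage counter and emits keep gaps directly; no merged-interval list is materialised.
import Mathlib
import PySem

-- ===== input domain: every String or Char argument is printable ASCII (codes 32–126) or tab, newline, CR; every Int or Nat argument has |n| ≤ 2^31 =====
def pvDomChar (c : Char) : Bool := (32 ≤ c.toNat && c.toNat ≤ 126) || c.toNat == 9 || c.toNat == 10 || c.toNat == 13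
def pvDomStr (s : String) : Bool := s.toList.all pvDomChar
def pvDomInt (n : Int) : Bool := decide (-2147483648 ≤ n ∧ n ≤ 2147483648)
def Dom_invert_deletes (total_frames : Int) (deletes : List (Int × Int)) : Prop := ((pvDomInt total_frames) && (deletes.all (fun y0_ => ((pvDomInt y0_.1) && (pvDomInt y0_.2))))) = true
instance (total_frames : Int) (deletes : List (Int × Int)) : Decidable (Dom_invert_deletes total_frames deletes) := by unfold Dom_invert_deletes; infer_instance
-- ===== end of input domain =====

-- B replaces A's merge-intervals-then-invert with a sweep-line over sorted start/end
-- events and a coverage counter (objective: alternative algorithm, same O(n log n) cost).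

-- ===== PORT A =====
-- the `for s,e in ranges[1:]` loop of _merge_ranges: acc = finished blocks, cur = merged[-1]
def pvMergeGo : List (Int × Int) → (Int × Int) → List (Int × Int) → List (Int × Int)
  | acc, cur, [] => acc ++ [cur]
  | acc, cur, (s, e) :: r =>
    if s ≤ cur.2 then pvMergeGo acc (cur.1, max cur.2 e) r
    else pvMergeGo (acc ++ [cur]) (s, e) r

def pvMergeRanges (ranges : List (Int × Int)) : List (Int × Int) :=
  match PySem.List.sorted2 (ranges.filter (fun p => decide (p.2 > p.1))) Prod.fst Prod.snd false with
  | [] => []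
  | c :: rest => pvMergeGo [] c rest

-- the `for s,e in dels` loop of invert_deletes
def pvInvertGo : Int → List (Int × Int) → List (Int × Int) → Int × List (Int × Int)
  | prev, keeps, [] => (prev, keeps)
  | prev, keeps, (s, e) :: r => pvInvertGo e (if prev < s then keeps ++ [(prev, s)] else keeps) r

def invert_deletes (total_frames : Int) (deletes : List (Int × Int)) : List (Int × Int) :=
  let dels := pvMergeRanges deletes
  let r := pvInvertGo 0 [] dels
  if r.1 < total_frames then r.2 ++ [(r.1, total_frames)] else r.2

-- ===== PORT B =====
-- event list: (coord, 0) for a start, (coord, 1) for an end, one pair per delete with e > s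
def pvEvents : List (Int × Int) → List (Int × Int)
  | [] => []
  | (s, e) :: r => (if e > s then [(s, 0), (e, 1)] else []) ++ pvEvents r

-- the `for c,t in events` sweep loop: coverage counter, position where coverage hit 0, keeps
def pvSweepGo : Int → Int → List (Int × Int) → List (Int × Int) → Int × List (Int × Int)
  | _, prev, keeps, [] => (prev, keeps)
  | count, prev, keeps, (c, t) :: r =>
    if t = 0 then
      pvSweepGo (count + 1) prev (if count = 0 ∧ prev < c then keeps ++ [(prev, c)] else keeps) r
    else
      pvSweepGo (count - 1) (if count - 1 = 0 then c else prev) keeps r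

def invert_deletes_alt (total_frames : Int) (deletes : List (Int × Int)) : List (Int × Int) :=
  let evs := PySem.List.sorted2 (pvEvents deletes) Prod.fst Prod.snd false
  let r := pvSweepGo 0 0 [] evs
  if r.1 < total_frames then r.2 ++ [(r.1, total_frames)] else r.2

-- ===== PRECONDITION & SPEC =====
def Spec_invert_deletes (total_frames : Int) (deletes : List (Int × Int)) (out : List (Int × Int)) : Prop := out = invert_deletes_alt total_frames deletes
instance (total_frames : Int) (deletes : List (Int × Int)) (out : List (Int × Int)) : Decidable (Spec_invert_deletes total_frames deletes out) := by unfold Spec_invert_deletes; infer_instance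

-- ===== CLAIM (what is proved, stated in full; the proofs are below) =====
def Claim_equal_invert_deletes : Prop := ∀ (total_frames : Int) (deletes : List (Int × Int)), Dom_invert_deletes total_frames deletes → Spec_invert_deletes total_frames deletes (invert_deletes total_frames deletes)

-- ===== LEMMAS AND PROOFS =====
def pvLexLE (a b : Int × Int) : Prop := a.1 < b.1 ∨ (a.1 = b.1 ∧ a.2 ≤ b.2)
def pvResOpen : Int → List (Int × Int) → List (Int × Int) → Int × List (Int × Int)
  | cover, [], acc => (cover, acc)
  | cover, (s, e) :: r, acc =>
    if s ≤ cover then pvResOpen (max cover e) r acc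
    else pvResOpen e r (acc ++ [(cover, s)])
def pvResIdle (prev : Int) (S : List (Int × Int)) (acc : List (Int × Int)) : Int × List (Int × Int) :=
  match S with
  | [] => (prev, acc)
  | (s, e) :: r => pvResOpen e r (acc ++ if prev < s then [(prev, s)] else [])
def pvResFrom (P : List Int) (prev : Int) (S acc : List (Int × Int)) : Int × List (Int × Int) :=
  match P with
  | [] => pvResIdle prev S acc
  | q :: _ => pvResOpen q S acc
def pvOins (x : Int) : List Int → List Int
  | [] => [x]
  | q :: Q => if q ≤ x then x :: q :: Q else q :: pvOins x Q
def pvEnd (x : Int) : Int × Int := (x, 1)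
def pvEv (p : Int × Int) : List (Int × Int) := [(p.1, 0), (p.2, 1)]

theorem pvHeadMin {y c : Int × Int} {E' M : List (Int × Int)}
    (hpw : (y :: E').Pairwise pvLexLE) (hperm : (y :: E').Perm M)
    (hc : c ∈ M) (hmin : ∀ z ∈ M, pvLexLE c z) : y = c := by
  have hyM : y ∈ M := hperm.subset (List.mem_cons_self)
  have h1 : pvLexLE c y := hmin y hyM
  have hcE : c ∈ y :: E' := hperm.symm.subset hc
  rcases List.mem_cons.mp hcE with h | h
  · exact h.symm
  · have h2 : pvLexLE y c := (List.pairwise_cons.mp hpw).1 c h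
    unfold pvLexLE at h1 h2
    have : y.1 = c.1 ∧ y.2 = c.2 := by omega
    exact Prod.ext this.1 this.2

theorem pvOins_length (x : Int) (P : List Int) : (pvOins x P).length = P.length + 1 := by
  induction P with
  | nil => rfl
  | cons q Q ih => by_cases h : q ≤ x <;> simp [pvOins, h, ih]

theorem pvOins_perm (x : Int) (P : List Int) : (pvOins x P).Perm (x :: P) := by
  induction P with
  | nil => rfl
  | cons q Q ih =>
    by_cases h : q ≤ x
    · simp [pvOins, h]
    · simp only [pvOins, h, if_neg, not_false_iff]
      exact (ih.cons q).trans (List.Perm.swap x q Q)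

theorem pvOins_mem {x y : Int} {P : List Int} (h : y ∈ pvOins x P) : y = x ∨ y ∈ P := by
  have := (pvOins_perm x P).subset h
  simpa using this

theorem pvOins_pairwise (x : Int) {P : List Int} (h : P.Pairwise (· ≥ ·)) :
    (pvOins x P).Pairwise (· ≥ ·) := by
  induction P with
  | nil => simp [pvOins]
  | cons q Q ih =>
    rcases List.pairwise_cons.mp h with ⟨hq, hQ⟩
    by_cases hle : q ≤ x
    · simp only [pvOins, hle, if_pos]
      refine List.pairwise_cons.mpr ⟨?_, h⟩
      intro y hy
      rcases List.mem_cons.mp hy with rfl | hy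
      · exact hle
      · exact le_trans (hq y hy) hle
    · simp only [pvOins, hle, if_neg, not_false_iff]
      refine List.pairwise_cons.mpr ⟨?_, ih hQ⟩
      intro y hy
      rcases pvOins_mem hy with rfl | hy
      · omega
      · exact hq y hy

theorem pvResFrom_oins (e0 q : Int) (Q : List Int) (prev : Int) (S acc : List (Int × Int)) :
    pvResFrom (pvOins e0 (q :: Q)) prev S acc = pvResOpen (max q e0) S acc := by
  by_cases h : q ≤ e0
  · simp [pvOins, h, pvResFrom]
  · have : max q e0 = q := max_eq_left (by omega)
    simp only [pvOins, h, if_neg, not_false_iff]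
    cases hq : pvOins e0 Q <;> simp [pvResFrom, this]

theorem pvDescLast {q : Int} {Q : List Int} (h : (q :: Q).Pairwise (· ≥ ·)) :
    ∀ x ∈ q :: Q, (q :: Q).getLast (by simp) ≤ x := by
  induction Q generalizing q with
  | nil => intro x hx; simp at hx; simp [hx]
  | cons q2 Q2 ih =>
    intro x hx
    rcases List.pairwise_cons.mp h with ⟨hq, h2⟩
    have hlast : (q :: q2 :: Q2).getLast (by simp) = (q2 :: Q2).getLast (by simp) := by
      simp [List.getLast_cons]
    rw [hlast]
    rcases List.mem_cons.mp hx with rfl | hx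
    · exact le_trans (ih h2 q2 List.mem_cons_self) (hq q2 List.mem_cons_self)
    · exact ih h2 x hx

theorem pvPermLast {q : Int} {Q : List Int} :
    (q :: Q).Perm ((q :: Q).getLast (by simp) :: (q :: Q).dropLast) := by
  conv_lhs => rw [← List.dropLast_append_getLast (l := q :: Q) (by simp)]
  exact List.perm_append_comm.trans (by simp)

theorem pvMain (E : List (Int × Int)) :
    E.Pairwise pvLexLE →
    ∀ (P : List Int) (S : List (Int × Int)) (prev : Int) (acc : List (Int × Int)),
      E.Perm (P.map pvEnd ++ S.flatMap pvEv) →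
      P.Pairwise (· ≥ ·) → S.Pairwise pvLexLE → (∀ p ∈ S, p.1 < p.2) →
      pvSweepGo (P.length : Int) prev acc E = pvResFrom P prev S acc := by
  induction E with
  | nil =>
    intro _ P S prev acc hperm hP hS hval
    have hM : P.map pvEnd ++ S.flatMap pvEv = [] := hperm.symm.eq_nil
    rcases List.append_eq_nil_iff.mp hM with ⟨hPm, hSm⟩
    have hPnil : P = [] := List.map_eq_nil_iff.mp hPm
    have hSnil : S = [] := by
      cases S with
      | nil => rfl
      | cons p r => simp [List.flatMap_cons, pvEv] at hSm
    subst hPnil; subst hSnil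
    simp [pvSweepGo, pvResFrom, pvResIdle]
  | cons y E' ih =>
    intro hpw P S prev acc hperm hP hS hval
    obtain ⟨c, t⟩ := y
    have hpw' : E'.Pairwise pvLexLE := (List.pairwise_cons.mp hpw).2
    cases P with
    | nil =>
      cases S with
      | nil => simp at hperm
      | cons p S' =>
        obtain ⟨s0, e0⟩ := p
        rw [show (((s0, e0) :: S').flatMap pvEv) = (s0, 0) :: (e0, 1) :: S'.flatMap pvEv by
          simp [pvEv, List.flatMap_cons]] at hperm
        simp only [List.map_nil, List.nil_append] at hperm
        have hs0e0 : s0 < e0 := hval (s0, e0) List.mem_cons_self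
        have hSmin : ∀ p ∈ S', s0 ≤ p.1 ∧ p.1 < p.2 := by
          intro p hp
          have h1 : pvLexLE (s0, e0) p := (List.pairwise_cons.mp hS).1 p hp
          have h2 : p.1 < p.2 := hval p (List.mem_cons_of_mem _ hp)
          unfold pvLexLE at h1; simp at h1; omega
        have hhd : ((c, t) : Int × Int) = (s0, 0) := by
          refine pvHeadMin hpw hperm List.mem_cons_self ?_
          intro z hz
          rcases List.mem_cons.mp hz with rfl | hz
          · exact Or.inr ⟨rfl, le_refl _⟩
          rcases List.mem_cons.mp hz with rfl | hz
          · exact Or.inl hs0e0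
          · rcases List.mem_flatMap.mp hz with ⟨p, hp, hzp⟩
            have := hSmin p hp
            simp only [pvEv, List.mem_cons, List.not_mem_nil, or_false] at hzp
            unfold pvLexLE
            rcases hzp with rfl | rfl
            · simp; omega
            · simp; omega
        rw [hhd] at hperm ⊢
        have hperm' : E'.Perm ([e0].map pvEnd ++ S'.flatMap pvEv) := by
          rw [show ([e0].map pvEnd ++ S'.flatMap pvEv) = (e0, 1) :: S'.flatMap pvEv by simp [pvEnd]]
          exact hperm.cons_inv
        have hrec := ih hpw' [e0] S' prev
          (if prev < s0 then acc ++ [(prev, s0)] else acc) hperm' (by simp)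
          (List.pairwise_cons.mp hS).2 (fun p hp => hval p (List.mem_cons_of_mem _ hp))
        simp only [List.length_cons, List.length_nil] at hrec
        simp only [pvSweepGo, List.length_nil, Nat.cast_zero, if_true, true_and]
        norm_num at hrec
        rw [show ((0 : Int) + 1) = (1 : Int) by norm_num]
        rw [hrec]
        simp only [pvResFrom, pvResIdle]
        by_cases hps : prev < s0 <;> simp [hps]
    | cons q Q =>
      have hql : ∀ x ∈ q :: Q, (q :: Q).getLast (by simp) ≤ x := pvDescLast hP
      have hpm : (q :: Q).getLast (by simp) ∈ q :: Q := List.getLast_mem _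
      cases S with
      | nil =>
        simp only [List.flatMap_nil, List.append_nil] at hperm
        have hhd : ((c, t) : Int × Int) = pvEnd ((q :: Q).getLast (by simp)) := by
          refine pvHeadMin hpw hperm (List.mem_map.mpr ⟨_, hpm, rfl⟩) ?_
          intro z hz
          rcases List.mem_map.mp hz with ⟨x, hx, rfl⟩
          have := hql x hx
          unfold pvLexLE pvEnd
          simp
          omega
        rw [show pvEnd ((q :: Q).getLast (by simp)) = ((q :: Q).getLast (by simp), 1) from rfl] at hhd
        rw [hhd] at hperm ⊢
        cases Q with
        | nil =>
          rw [show ((q :: []) : List Int).getLast (by simp) = q from rfl] at hperm ⊢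
          have hE' : E' = [] := by
            have h := hperm.length_eq
            simp [pvEnd] at h
            exact h
          subst hE'
          simp [pvSweepGo, pvResFrom, pvResOpen]
        | cons q2 Q2 =>
          have hperm2 : ((q :: q2 :: Q2).map pvEnd).Perm
              (((q :: q2 :: Q2).getLast (by simp), 1) :: ((q :: q2 :: Q2).dropLast.map pvEnd)) := by
            simpa [pvEnd] using (pvPermLast (q := q) (Q := q2 :: Q2)).map pvEnd
          have hperm' : E'.Perm ((q :: q2 :: Q2).dropLast.map pvEnd ++ ([] : List (Int × Int)).flatMap pvEv) := by
            simpa using (hperm.trans hperm2).cons_inv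
          have hP' : ((q :: q2 :: Q2).dropLast).Pairwise (· ≥ ·) :=
            List.Pairwise.sublist (List.dropLast_sublist _) hP
          have hrec := ih hpw' (q :: q2 :: Q2).dropLast [] prev acc hperm' hP' (by simp) (by simp)
          have hlen : ((q :: q2 :: Q2).length : Int) - 1 = (((q :: q2 :: Q2).dropLast).length : Int) := by
            simp [List.length_dropLast]
          have hne : ¬ (((q :: q2 :: Q2).length : Int) - 1 = 0) := by
            simp; omega
          simp only [pvSweepGo]
          rw [if_neg (by norm_num : ¬ (1 : Int) = 0), if_neg hne, hlen, hrec]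
          rw [show (q :: q2 :: Q2).dropLast = q :: (q2 :: Q2).dropLast from rfl]
          simp [pvResFrom]
      | cons p S' =>
        obtain ⟨s0, e0⟩ := p
        rw [show (((s0, e0) :: S').flatMap pvEv) = (s0, 0) :: (e0, 1) :: S'.flatMap pvEv by
          simp [pvEv, List.flatMap_cons]] at hperm
        have hs0e0 : s0 < e0 := hval (s0, e0) List.mem_cons_self
        have hSmin : ∀ p ∈ S', s0 ≤ p.1 ∧ p.1 < p.2 := by
          intro p hp
          have h1 : pvLexLE (s0, e0) p := (List.pairwise_cons.mp hS).1 p hp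
          have h2 : p.1 < p.2 := hval p (List.mem_cons_of_mem _ hp)
          unfold pvLexLE at h1; simp at h1; omega
        by_cases hcmp : s0 ≤ (q :: Q).getLast (by simp)
        · -- head is (s0, 0): a start; coverage grows
          have hhd : ((c, t) : Int × Int) = (s0, 0) := by
            refine pvHeadMin hpw hperm (by simp) ?_
            intro z hz
            rcases List.mem_append.mp hz with hz | hz
            · rcases List.mem_map.mp hz with ⟨x, hx, rfl⟩
              have := hql x hx
              unfold pvLexLE pvEnd; simp; omega
            · rcases List.mem_cons.mp hz with rfl | hz
              · exact Or.inr ⟨rfl, le_refl _⟩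
              rcases List.mem_cons.mp hz with rfl | hz
              · exact Or.inl hs0e0
              · rcases List.mem_flatMap.mp hz with ⟨p, hp, hzp⟩
                have := hSmin p hp
                simp only [pvEv, List.mem_cons, List.not_mem_nil, or_false] at hzp
                unfold pvLexLE
                rcases hzp with rfl | rfl
                · simp; omega
                · simp; omega
          rw [hhd] at hperm ⊢
          have hstep1 : E'.Perm ((q :: Q).map pvEnd ++ ((e0, 1) :: S'.flatMap pvEv)) :=
            (hperm.trans List.perm_middle).cons_inv
          have hoins : ((pvOins e0 (q :: Q)).map pvEnd ++ S'.flatMap pvEv).Perm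
              ((e0, 1) :: ((q :: Q).map pvEnd ++ S'.flatMap pvEv)) := by
            have h1 := ((pvOins_perm e0 (q :: Q)).map pvEnd).append_right (S'.flatMap pvEv)
            simpa [pvEnd] using h1
          have hstep2 : E'.Perm ((pvOins e0 (q :: Q)).map pvEnd ++ S'.flatMap pvEv) :=
            (hstep1.trans List.perm_middle).trans hoins.symm
          have hrec := ih hpw' (pvOins e0 (q :: Q)) S' prev
            (if ((((q :: Q).length : Nat) : Int) = 0 ∧ prev < s0) then acc ++ [(prev, s0)] else acc)
            hstep2 (pvOins_pairwise e0 hP) (List.pairwise_cons.mp hS).2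
            (fun p hp => hval p (List.mem_cons_of_mem _ hp))
          have hcount : (((q :: Q).length : Int)) + 1 = ((pvOins e0 (q :: Q)).length : Int) := by
            rw [pvOins_length]; push_cast; ring
          have hcne : ¬ ((((q :: Q).length : Nat) : Int) = 0 ∧ prev < s0) := by
            simp
            omega
          rw [if_neg hcne] at hrec
          simp only [pvSweepGo, if_true]
          rw [if_neg hcne, hcount, hrec, pvResFrom_oins]
          have hq : s0 ≤ q := le_trans hcmp (hql q List.mem_cons_self)
          simp [pvResFrom, pvResOpen, hq]
        · -- head is (pmin, 1): close the lowest pending end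
          rw [not_le] at hcmp
          have hhd : ((c, t) : Int × Int) = ((q :: Q).getLast (by simp), 1) := by
            refine pvHeadMin hpw hperm
              (List.mem_append.mpr (Or.inl (List.mem_map.mpr ⟨_, hpm, rfl⟩))) ?_
            intro z hz
            rcases List.mem_append.mp hz with hz | hz
            · rcases List.mem_map.mp hz with ⟨x, hx, rfl⟩
              have := hql x hx
              unfold pvLexLE pvEnd; simp; omega
            · rcases List.mem_cons.mp hz with rfl | hz
              · exact Or.inl hcmp
              rcases List.mem_cons.mp hz with rfl | hz
              · unfold pvLexLE; simp; omega
              · rcases List.mem_flatMap.mp hz with ⟨p, hp, hzp⟩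
                have := hSmin p hp
                simp only [pvEv, List.mem_cons, List.not_mem_nil, or_false] at hzp
                unfold pvLexLE
                rcases hzp with rfl | rfl
                · simp; omega
                · simp; omega
          rw [hhd] at hperm ⊢
          cases Q with
          | nil =>
            rw [show ((q :: []) : List Int).getLast (by simp) = q from rfl] at hperm hcmp ⊢
            have hperm' : E'.Perm (([] : List Int).map pvEnd ++ ((s0, e0) :: S').flatMap pvEv) := by
              rw [show (([] : List Int).map pvEnd ++ ((s0, e0) :: S').flatMap pvEv)
                    = (s0, 0) :: (e0, 1) :: S'.flatMap pvEv by simp [pvEv, List.flatMap_cons]]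
              have h1 : ((q, 1) :: E').Perm ((q, 1) :: ((s0, 0) :: (e0, 1) :: S'.flatMap pvEv)) := by
                simpa [pvEnd] using hperm
              exact h1.cons_inv
            have hrec := ih hpw' [] ((s0, e0) :: S') q acc hperm' (by simp) hS hval
            simp only [List.length_nil, Nat.cast_zero] at hrec
            simp only [pvSweepGo]
            rw [if_neg (by norm_num : ¬ (1 : Int) = 0)]
            rw [if_pos (by simp : (((((q :: []) : List Int).length : Nat) : Int) - 1 = 0))]
            rw [show (((((q :: []) : List Int).length : Nat) : Int) - 1) = (0 : Int) by simp]
            rw [hrec]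
            simp only [pvResFrom, pvResIdle, pvResOpen]
            have hns : ¬ s0 ≤ q := by omega
            simp [hns, hcmp]
          | cons q2 Q2 =>
            have hperm2 : ((q :: q2 :: Q2).map pvEnd).Perm
                (((q :: q2 :: Q2).getLast (by simp), 1) :: ((q :: q2 :: Q2).dropLast.map pvEnd)) := by
              simpa [pvEnd] using (pvPermLast (q := q) (Q := q2 :: Q2)).map pvEnd
            have hperm' : E'.Perm ((q :: q2 :: Q2).dropLast.map pvEnd ++ ((s0, e0) :: S').flatMap pvEv) := by
              have h1 := hperm.trans (hperm2.append_right ((s0, 0) :: (e0, 1) :: S'.flatMap pvEv))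
              simp only [List.cons_append] at h1
              have h2 := h1.cons_inv
              rw [show (((s0, e0) :: S').flatMap pvEv) = (s0, 0) :: (e0, 1) :: S'.flatMap pvEv by
                simp [pvEv, List.flatMap_cons]]
              exact h2
            have hP' : ((q :: q2 :: Q2).dropLast).Pairwise (· ≥ ·) :=
              List.Pairwise.sublist (List.dropLast_sublist _) hP
            have hrec := ih hpw' (q :: q2 :: Q2).dropLast ((s0, e0) :: S') prev acc hperm' hP' hS hval
            have hlen : ((q :: q2 :: Q2).length : Int) - 1 = (((q :: q2 :: Q2).dropLast).length : Int) := by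
              simp [List.length_dropLast]
            have hne : ¬ (((q :: q2 :: Q2).length : Int) - 1 = 0) := by
              simp; omega
            simp only [pvSweepGo]
            rw [if_neg (by norm_num : ¬ (1 : Int) = 0), if_neg hne, hlen, hrec]
            rw [show (q :: q2 :: Q2).dropLast = q :: (q2 :: Q2).dropLast from rfl]
            simp [pvResFrom]

theorem pv_sorted2_eq (xs : List (Int × Int)) :
    PySem.List.sorted2 xs Prod.fst Prod.snd false
      = PySem.List.sorted xs (fun p => toLex p) false := by
  have hb : (fun (a b : Int × Int) => (decide (a.1 < b.1) || (!decide (b.1 < a.1) && decide (a.2 < b.2))))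
      = (fun (a b : Int × Int) => decide ((fun p : Int × Int => toLex p) a < (fun p : Int × Int => toLex p) b)) := by
    funext a b
    rw [Bool.eq_iff_iff]
    simp [Prod.Lex.lt_iff]
    omega
  simp only [PySem.List.sorted2, PySem.List.sorted]
  rw [hb]
  rfl

theorem pv_sorted2_pairwise (xs : List (Int × Int)) :
    (PySem.List.sorted2 xs Prod.fst Prod.snd false).Pairwise pvLexLE := by
  rw [pv_sorted2_eq]
  have h := PySem.List.sorted_pairwise xs (fun p : Int × Int => toLex p)
  refine h.imp ?_
  intro a b hab
  have := Prod.Lex.le_iff.mp hab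
  unfold pvLexLE
  simpa using this

theorem pvMergeGo_append (S : List (Int × Int)) : ∀ acc cur,
    pvMergeGo acc cur S = acc ++ pvMergeGo [] cur S := by
  induction S with
  | nil => intro acc cur; simp [pvMergeGo]
  | cons p r ih =>
    intro acc cur
    obtain ⟨s, e⟩ := p
    by_cases h : s ≤ cur.2
    · simp only [pvMergeGo, h, if_pos]
      rw [ih acc, ih []]
    · simp only [pvMergeGo, h, if_neg, not_false_iff]
      rw [ih (acc ++ [cur]), ih ([] ++ [cur])]
      simp

theorem pvLemmaA (S : List (Int × Int)) : ∀ (cur : Int × Int) (prev : Int) (acc : List (Int × Int)),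
    (cur :: S).Pairwise pvLexLE →
    pvInvertGo prev acc (pvMergeGo [] cur S)
      = pvResOpen cur.2 S (acc ++ if prev < cur.1 then [(prev, cur.1)] else []) := by
  induction S with
  | nil =>
    intro cur prev acc _
    obtain ⟨a, b⟩ := cur
    by_cases h : prev < a <;> simp [pvMergeGo, pvInvertGo, pvResOpen, h]
  | cons p r ih =>
    intro cur prev acc hpw
    obtain ⟨s, e⟩ := p
    rcases List.pairwise_cons.mp hpw with ⟨hcur, hrest⟩
    by_cases h : s ≤ cur.2
    · simp only [pvMergeGo, h, if_pos]
      rw [ih (cur.1, max cur.2 e) prev acc ?_]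
      · simp only [pvResOpen, h, if_pos]
      · refine List.pairwise_cons.mpr ⟨?_, (List.pairwise_cons.mp hrest).2⟩
        intro x hx
        have h1 : pvLexLE cur x := hcur x (List.mem_cons_of_mem _ hx)
        have h2 : pvLexLE (s, e) x := (List.pairwise_cons.mp hrest).1 x hx
        have h3 : pvLexLE cur (s, e) := hcur (s, e) List.mem_cons_self
        unfold pvLexLE at *
        simp at *
        omega
    · simp only [pvMergeGo, h, if_neg, not_false_iff]
      rw [pvMergeGo_append]
      have : pvInvertGo prev acc ([] ++ [cur] ++ pvMergeGo [] (s, e) r)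
          = pvInvertGo cur.2 (if prev < cur.1 then acc ++ [(prev, cur.1)] else acc) (pvMergeGo [] (s, e) r) := by
        simp [pvInvertGo]
      rw [this, ih (s, e) cur.2 _ hrest]
      have hlt : cur.2 < s := by omega
      simp only [pvResOpen, h, if_neg, not_false_iff]
      congr 1
      by_cases hp : prev < cur.1 <;> simp [hp, hlt]

theorem pvEvents_eq (l : List (Int × Int)) :
    pvEvents l = (l.filter (fun p => decide (p.2 > p.1))).flatMap pvEv := by
  induction l with
  | nil => simp [pvEvents]
  | cons p r ih =>
    obtain ⟨s, e⟩ := p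
    by_cases h : e > s <;> simp [pvEvents, h, ih, pvEv]

theorem pvASide (deletes : List (Int × Int)) :
    pvInvertGo 0 [] (pvMergeRanges deletes)
      = pvResIdle 0 (PySem.List.sorted2 (deletes.filter (fun p => decide (p.2 > p.1))) Prod.fst Prod.snd false) [] := by
  unfold pvMergeRanges
  cases hFS : PySem.List.sorted2 (deletes.filter (fun p => decide (p.2 > p.1))) Prod.fst Prod.snd false with
  | nil => simp [pvInvertGo, pvResIdle]
  | cons cur rest =>
    have hpw : (cur :: rest).Pairwise pvLexLE := by
      rw [← hFS]; exact pv_sorted2_pairwise _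
    obtain ⟨a, b⟩ := cur
    rw [pvLemmaA rest (a, b) 0 [] hpw]
    simp [pvResIdle]

theorem pvBSide (deletes : List (Int × Int)) :
    pvSweepGo 0 0 [] (PySem.List.sorted2 (pvEvents deletes) Prod.fst Prod.snd false)
      = pvResIdle 0 (PySem.List.sorted2 (deletes.filter (fun p => decide (p.2 > p.1))) Prod.fst Prod.snd false) [] := by
  have hpw := pv_sorted2_pairwise (pvEvents deletes)
  have hFSperm : (PySem.List.sorted2 (deletes.filter (fun p => decide (p.2 > p.1))) Prod.fst Prod.snd false).Perm
      (deletes.filter (fun p => decide (p.2 > p.1))) := PySem.List.sorted2_perm _ _ _ _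
  have hperm : (PySem.List.sorted2 (pvEvents deletes) Prod.fst Prod.snd false).Perm
      (([] : List Int).map pvEnd ++
        (PySem.List.sorted2 (deletes.filter (fun p => decide (p.2 > p.1))) Prod.fst Prod.snd false).flatMap pvEv) := by
    refine (PySem.List.sorted2_perm _ _ _ _).trans ?_
    rw [pvEvents_eq]
    simp only [List.map_nil, List.nil_append]
    exact (hFSperm.symm).flatMap (fun a _ => List.Perm.refl _)
  have hval : ∀ p ∈ PySem.List.sorted2 (deletes.filter (fun p => decide (p.2 > p.1))) Prod.fst Prod.snd false, p.1 < p.2 := by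
    intro p hp
    have : p ∈ deletes.filter (fun p => decide (p.2 > p.1)) := hFSperm.subset hp
    have := (List.mem_filter.mp this).2
    simpa using this
  have h := pvMain _ hpw [] _ 0 [] hperm (by simp) (pv_sorted2_pairwise _) hval
  simpa [pvResFrom] using h

theorem pvFinal (total_frames : Int) (deletes : List (Int × Int)) :
    invert_deletes total_frames deletes = invert_deletes_alt total_frames deletes := by
  show (let dels := pvMergeRanges deletes
        let r := pvInvertGo 0 [] dels
        if r.1 < total_frames then r.2 ++ [(r.1, total_frames)] else r.2)
      = (let evs := PySem.List.sorted2 (pvEvents deletes) Prod.fst Prod.snd false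
         let r := pvSweepGo 0 0 [] evs
         if r.1 < total_frames then r.2 ++ [(r.1, total_frames)] else r.2)
  simp only []
  rw [pvASide, pvBSide]

-- ===== VERDICT (by name: the statement is the Claim_ definition above) =====
theorem invert_deletes_spec : Claim_equal_invert_deletes := by
  intro total_frames deletes _
  exact pvFinal total_frames deletes
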